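-- pv_equiv track=rewrite | github.com/gribgp/LearnPython | Lesson4/dkzhang/testPeakString.py | is_peak_string
-- ===== SOURCE A (Python) =====
-- def is_peak_string(theStr):
--     strLen = len(theStr)
--
--     if strLen < 3:
--         return False
--
--     if theStr[1] < theStr[0]:
--         return False
--
--     for i in range(1, strLen-1):
--         # Find the peak
--         if theStr[i+1] < theStr[i]:
--             # Check Previous
--             if theStr[i-1] == theStr[i]:
--                 return False
--
--             # Confirm downhill
--             for j in range(i+1, strLen-1):
--                 if theStr[j+1] > theStr[j]:
--                     return False
--             return True
--     return False
-- ===== SOURCE B (Python) =====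
-- def is_peak_string(theStr):
--     n = len(theStr)
--     i = 0
--     while i + 1 < n and theStr[i] <= theStr[i + 1]:
--         i += 1
--     j = n - 1
--     while j > 0 and theStr[j] <= theStr[j - 1]:
--         j -= 1
--     return 0 < i and i == j and j < n - 1
-- ===== Notes on version B (the rewrite author's own statement) =====
-- stated objective: idiomatic
-- what changed: Replaced A's forward search for the first descent plus a nested downhill re-scan by two convergent boundary walks (climb right from 0, climb left from n-1) that meet exactly at a single strict peak.
import Mathlib
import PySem

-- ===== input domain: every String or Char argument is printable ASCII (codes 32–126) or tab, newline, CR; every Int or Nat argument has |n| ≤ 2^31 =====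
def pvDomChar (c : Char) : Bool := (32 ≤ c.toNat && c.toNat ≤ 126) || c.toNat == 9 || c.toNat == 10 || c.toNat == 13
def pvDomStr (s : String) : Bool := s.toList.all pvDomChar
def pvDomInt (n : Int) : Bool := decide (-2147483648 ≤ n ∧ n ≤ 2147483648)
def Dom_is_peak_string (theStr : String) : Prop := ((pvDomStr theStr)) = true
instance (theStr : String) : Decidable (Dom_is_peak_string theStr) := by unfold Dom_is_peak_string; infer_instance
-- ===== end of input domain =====

-- ===== PORT A =====
-- B replaces A's first-descent search + nested downhill re-scan by two inward boundary
-- walks; genuinely different decomposition, same O(n) cost ("idiomatic"/"alternative").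
-- Every index either port computes is in range, so List.getD is an exact port of Python indexing.
def pvAt (cs : List Char) (i : Nat) : Char := cs.getD i ' '

-- inner loop: for j in range(i+1, strLen-1): if theStr[j+1] > theStr[j]: return False / return True
def pvDownA (cs : List Char) (j : Nat) : Bool :=
  if j < cs.length - 1 then
    if pvAt cs j < pvAt cs (j + 1) then false
    else pvDownA cs (j + 1)
  else true
termination_by cs.length - 1 - j
decreasing_by omega

-- outer loop: for i in range(1, strLen-1): ...
def pvLoopA (cs : List Char) (i : Nat) : Bool :=
  if i < cs.length - 1 then
    if pvAt cs (i + 1) < pvAt cs i then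
      if pvAt cs (i - 1) == pvAt cs i then false
      else pvDownA cs (i + 1)
    else pvLoopA cs (i + 1)
  else false
termination_by cs.length - 1 - i
decreasing_by omega

def is_peak_string (theStr : String) : Bool :=
  let cs := theStr.toList
  if cs.length < 3 then false
  else if pvAt cs 1 < pvAt cs 0 then false
  else pvLoopA cs 1

-- ===== PORT B =====
-- while i + 1 < n and theStr[i] <= theStr[i+1]: i += 1
def pvClimbR (cs : List Char) (i : Nat) : Nat :=
  if i + 1 < cs.length ∧ pvAt cs i ≤ pvAt cs (i + 1) then pvClimbR cs (i + 1) else i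
termination_by cs.length - i
decreasing_by omega

-- while j > 0 and theStr[j] <= theStr[j-1]: j -= 1
def pvClimbL (cs : List Char) (j : Nat) : Nat :=
  if 0 < j ∧ pvAt cs j ≤ pvAt cs (j - 1) then pvClimbL cs (j - 1) else j
termination_by j
decreasing_by omega

-- Nat's n - 1 is 0 instead of Python's -1 only when n = 0; both walks then stay put and
-- the final test is False either way, so the port is exact.
def is_peak_string_alt (theStr : String) : Bool :=
  let cs := theStr.toList
  let n := cs.length
  let i := pvClimbR cs 0
  let j := pvClimbL cs (n - 1)
  decide (0 < i ∧ i = j ∧ j < n - 1)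

-- ===== PRECONDITION & SPEC =====
def Spec_is_peak_string (theStr : String) (out : Bool) : Prop := out = is_peak_string_alt theStr
instance (theStr : String) (out : Bool) : Decidable (Spec_is_peak_string theStr out) := by unfold Spec_is_peak_string; infer_instance

-- ===== CLAIM (what is proved, stated in full; the proofs are below) =====
def Claim_equal_is_peak_string : Prop := ∀ (theStr : String), Dom_is_peak_string theStr → Spec_is_peak_string theStr (is_peak_string theStr)

-- ===== LEMMAS AND PROOFS =====

lemma pvDownA_iff (cs : List Char) : ∀ d s, cs.length - 1 - s = d →
    (pvDownA cs s = true ↔ ∀ j, s ≤ j → j < cs.length - 1 → pvAt cs (j + 1) ≤ pvAt cs j) := by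
  intro d
  induction d with
  | zero =>
    intro s hs
    rw [pvDownA, if_neg (by omega : ¬ s < cs.length - 1)]
    constructor
    · intro _ j hj hj'; omega
    · intro _; rfl
  | succ d ih =>
    intro s hs
    rw [pvDownA, if_pos (by omega : s < cs.length - 1)]
    by_cases hlt : pvAt cs s < pvAt cs (s + 1)
    · rw [if_pos hlt]
      constructor
      · intro h; exact absurd h (by simp)
      · intro h; exact absurd (h s le_rfl (by omega)) (not_le.mpr hlt)
    · rw [if_neg hlt, ih (s + 1) (by omega)]
      constructor
      · intro h j hj hj'
        rcases Nat.eq_or_lt_of_le hj with rfl | hj2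
        · exact not_lt.mp hlt
        · exact h j hj2 hj'
      · intro h j hj hj'; exact h j (by omega) hj'

lemma pvClimbR_le (cs : List Char) (i : Nat) : i ≤ pvClimbR cs i := by
  rw [pvClimbR]
  split
  · exact le_trans (by omega) (pvClimbR_le cs (i + 1))
  · exact le_rfl
termination_by cs.length - i
decreasing_by omega

lemma pvClimbR_lt (cs : List Char) (i : Nat) (h : i < cs.length) : pvClimbR cs i < cs.length := by
  rw [pvClimbR]
  split
  · exact pvClimbR_lt cs (i + 1) (by omega)
  · exact h
termination_by cs.length - i
decreasing_by omega

lemma pvClimbR_ascent (cs : List Char) (i : Nat) :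
    ∀ k, i ≤ k → k < pvClimbR cs i → pvAt cs k ≤ pvAt cs (k + 1) := by
  rw [pvClimbR]
  split
  · rename_i hc
    intro k hk hk'
    rcases Nat.eq_or_lt_of_le hk with rfl | hk2
    · exact hc.2
    · exact pvClimbR_ascent cs (i + 1) k hk2 hk'
  · intro k hk hk'; omega
termination_by cs.length - i
decreasing_by omega

lemma pvClimbR_stop (cs : List Char) (i : Nat) :
    ¬ (pvClimbR cs i + 1 < cs.length ∧ pvAt cs (pvClimbR cs i) ≤ pvAt cs (pvClimbR cs i + 1)) := by
  rw [pvClimbR]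
  split
  · exact pvClimbR_stop cs (i + 1)
  · assumption
termination_by cs.length - i
decreasing_by omega

lemma pvClimbL_le (cs : List Char) (j : Nat) : pvClimbL cs j ≤ j := by
  rw [pvClimbL]
  split
  · exact le_trans (pvClimbL_le cs (j - 1)) (by omega)
  · exact le_rfl
termination_by j
decreasing_by omega

lemma pvClimbL_descent (cs : List Char) (j : Nat) :
    ∀ k, pvClimbL cs j < k → k ≤ j → pvAt cs k ≤ pvAt cs (k - 1) := by
  rw [pvClimbL]
  split
  · rename_i hc
    intro k hk hk'
    rcases Nat.eq_or_lt_of_le hk' with rfl | hk2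
    · exact hc.2
    · exact pvClimbL_descent cs (j - 1) k hk (by omega)
  · intro k hk hk'; omega
termination_by j
decreasing_by omega

lemma pvClimbL_stop (cs : List Char) (j : Nat) :
    ¬ (0 < pvClimbL cs j ∧ pvAt cs (pvClimbL cs j) ≤ pvAt cs (pvClimbL cs j - 1)) := by
  rw [pvClimbL]
  split
  · exact pvClimbL_stop cs (j - 1)
  · assumption
termination_by j
decreasing_by omega

-- uniqueness: the left walk lands exactly at a point t below which the descent breaks
lemma pvClimbL_eq (cs : List Char) : ∀ m t, t ≤ m →
    (∀ k, t < k → k ≤ m → pvAt cs k ≤ pvAt cs (k - 1)) →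
    (t = 0 ∨ pvAt cs (t - 1) < pvAt cs t) → pvClimbL cs m = t := by
  intro m
  induction m with
  | zero =>
    intro t ht _ _
    rw [pvClimbL, if_neg (by omega)]; omega
  | succ m ih =>
    intro t ht hdesc hstop
    rcases Nat.eq_or_lt_of_le ht with rfl | ht2
    · rw [pvClimbL]
      rcases hstop with h0 | hlt
      · omega
      · rw [if_neg]; rintro ⟨_, hle⟩; exact absurd hle (not_le.mpr hlt)
    · rw [pvClimbL, if_pos ⟨by omega, by simpa using hdesc (m + 1) (by omega) le_rfl⟩]
      exact ih t (by omega) (fun k hk hk' => hdesc k hk (by omega)) hstop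

-- A's outer loop is the right climb with a payload at the first descent
lemma pvLoopA_eq (cs : List Char) : ∀ d i, cs.length - 1 - i = d → pvLoopA cs i =
    if pvClimbR cs i + 1 < cs.length then
      (if pvAt cs (pvClimbR cs i - 1) == pvAt cs (pvClimbR cs i) then false
       else pvDownA cs (pvClimbR cs i + 1))
    else false := by
  intro d
  induction d with
  | zero =>
    intro i hi
    rw [pvLoopA, if_neg (by omega : ¬ i < cs.length - 1)]
    have : pvClimbR cs i = i := by rw [pvClimbR, if_neg (by rintro ⟨h, _⟩; omega)]
    rw [this, if_neg (by omega)]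
  | succ d ih =>
    intro i hi
    rw [pvLoopA, if_pos (by omega : i < cs.length - 1)]
    by_cases hlt : pvAt cs (i + 1) < pvAt cs i
    · rw [if_pos hlt]
      have hci : pvClimbR cs i = i := by
        rw [pvClimbR, if_neg (by rintro ⟨_, h⟩; exact absurd h (not_le.mpr hlt))]
      rw [hci, if_pos (by omega : i + 1 < cs.length)]
    · rw [if_neg hlt]
      have hci : pvClimbR cs i = pvClimbR cs (i + 1) := by
        rw [pvClimbR, if_pos ⟨by omega, not_lt.mp hlt⟩]
      rw [hci]; exact ih (i + 1) (by omega)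

-- ===== VERDICT (by name: the statement is the Claim_ definition above) =====
theorem is_peak_string_spec : Claim_equal_is_peak_string := by
  intro theStr _
  unfold Spec_is_peak_string is_peak_string is_peak_string_alt
  set cs := theStr.toList with hcs
  set n := cs.length with hn
  simp only []
  by_cases h3 : n < 3
  · rw [if_pos h3]
    symm
    rw [decide_eq_false_iff_not]
    rintro ⟨hi, hij, hj⟩
    have := pvClimbL_le cs (cs.length - 1)
    omega
  · rw [if_neg h3]
    by_cases h10 : pvAt cs 1 < pvAt cs 0
    · rw [if_pos h10]
      have hc0 : pvClimbR cs 0 = 0 := by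
        rw [pvClimbR, if_neg (by rintro ⟨_, h⟩; exact absurd h (not_le.mpr h10))]
      symm; rw [decide_eq_false_iff_not]
      rintro ⟨hi, _, _⟩; omega
    · rw [if_neg h10]
      have hc01 : pvClimbR cs 0 = pvClimbR cs 1 := by
        rw [pvClimbR, if_pos ⟨by omega, not_lt.mp h10⟩]
      set r := pvClimbR cs 1 with hr
      have hr1 : 1 ≤ r := pvClimbR_le cs 1
      have hrn : r < n := pvClimbR_lt cs 1 (by omega)
      have hasc : pvAt cs (r - 1) ≤ pvAt cs r := by
        rcases Nat.eq_or_lt_of_le hr1 with h | h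
        · simpa [← h] using not_lt.mp h10
        · have := pvClimbR_ascent cs 1 (r - 1) (by omega) (by omega)
          simpa [show r - 1 + 1 = r by omega] using this
      rw [pvLoopA_eq cs (cs.length - 1 - 1) 1 rfl, ← hr]
      by_cases hre : r + 1 < n
      · rw [if_pos hre]
        have hdesc1 : pvAt cs (r + 1) < pvAt cs r := by
          have := pvClimbR_stop cs 1
          rw [← hr] at this
          exact not_le.mp (fun h => this ⟨hre, h⟩)
        by_cases heq : pvAt cs (r - 1) == pvAt cs r
        · rw [if_pos heq]
          symm; rw [decide_eq_false_iff_not]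
          rintro ⟨hi, hij, hj⟩
          rw [hc01] at hi hij
          have hstop := pvClimbL_stop cs (cs.length - 1)
          rw [← hij] at hstop
          have : pvAt cs (r - 1) = pvAt cs r := by exact_mod_cast eq_of_beq heq
          exact hstop ⟨by omega, le_of_eq this.symm⟩
        · rw [if_neg heq]
          have hne : pvAt cs (r - 1) ≠ pvAt cs r := fun h => heq (by exact_mod_cast beq_iff_eq.mpr h)
          have hstrict : pvAt cs (r - 1) < pvAt cs r := lt_of_le_of_ne hasc hne
          by_cases hdw : pvDownA cs (r + 1) = true
          · rw [hdw]
            have hall := (pvDownA_iff cs (cs.length - 1 - (r + 1)) (r + 1) rfl).mp hdw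
            have hjr : pvClimbL cs (cs.length - 1) = r := by
              apply pvClimbL_eq cs (cs.length - 1) r (by omega)
              · intro k hk hk'
                rcases Nat.eq_or_lt_of_le hk with rfl | hk2
                · simpa using le_of_lt hdesc1
                · have := hall (k - 1) (by omega) (by omega)
                  simpa [show k - 1 + 1 = k by omega] using this
              · exact Or.inr hstrict
            symm; rw [decide_eq_true_iff, hc01]
            refine ⟨by omega, ?_, by rw [hjr]; omega⟩
            exact hjr.symm
          · rw [eq_false_of_ne_true hdw]
            symm; rw [decide_eq_false_iff_not]
            rintro ⟨hi, hij, hj⟩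
            rw [hc01] at hi hij
            apply hdw
            rw [pvDownA_iff cs (cs.length - 1 - (r + 1)) (r + 1) rfl]
            intro j hjl hju
            have := pvClimbL_descent cs (cs.length - 1) (j + 1) (by omega) (by omega)
            simpa using this
      · rw [if_neg hre]
        symm; rw [decide_eq_false_iff_not]
        rintro ⟨hi, hij, hj⟩
        rw [hc01] at hi hij
        have := pvClimbL_le cs (cs.length - 1)
        omega
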